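-- pv_equiv track=rewrite | github.com/cry999/AtCoder | cpsco/2019/session3/B.py | balloons
-- ===== SOURCE A (Python) =====
-- def balloons(N: int, M: int, A: list)->int:
--     num_ballon = 0
--     num_color = 0
--
--     A.sort(key=lambda x: -x)
--
--     for a in A:
--         num_ballon += a
--         num_color += 1
--
--         if M <= num_ballon:
--             break
--     return num_color
-- ===== SOURCE B (Python) =====
-- def balloons(N: int, M: int, A: list) -> int:
--     A.sort(reverse=True)
--     prefix = [0]
--     for a in A:
--         prefix.append(prefix[-1] + a)
--     for i, s in enumerate(prefix[1:], 1):
--         if M <= s: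
--             return i
--     return len(A)
-- ===== Notes on version B (the rewrite author's own statement) =====
-- stated objective: alternative
-- what changed: Replaces A's running-accumulator loop with an early break by building an explicit prefix-sum list and scanning it for the first index whose cumulative sum reaches M (default len(A)); sorts with reverse=True instead of key=-x.
import Mathlib
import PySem

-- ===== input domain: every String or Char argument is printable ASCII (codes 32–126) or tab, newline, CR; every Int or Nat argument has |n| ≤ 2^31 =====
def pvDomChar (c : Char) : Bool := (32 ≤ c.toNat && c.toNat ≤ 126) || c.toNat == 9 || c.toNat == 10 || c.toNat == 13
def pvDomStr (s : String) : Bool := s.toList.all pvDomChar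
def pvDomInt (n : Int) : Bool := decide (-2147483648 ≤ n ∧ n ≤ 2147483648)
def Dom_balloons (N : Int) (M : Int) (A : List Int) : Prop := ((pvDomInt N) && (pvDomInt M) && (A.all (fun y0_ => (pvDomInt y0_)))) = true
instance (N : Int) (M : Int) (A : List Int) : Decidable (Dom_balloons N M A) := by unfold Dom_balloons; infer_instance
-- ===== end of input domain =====

-- B replaces A's running-accumulator loop with a prefix-sum list scanned for the first
-- index whose sum reaches M (objective: alternative decomposition, same cost).
-- Both A and B sort the argument list A in place (identically); the equivalence proved
-- here is about the RETURN value.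

-- ===== PORT A =====
-- the for-loop over the descending-sorted list with the two accumulators and the break
def balloonsLoop (M : Int) : List Int → Int → Int → Int
  | [], _, num_color => num_color
  | a :: rest, num_ballon, num_color =>
    let nb := num_ballon + a
    let nc := num_color + 1
    if M ≤ nb then nc else balloonsLoop M rest nb nc

def balloons (N : Int) (M : Int) (A : List Int) : Int :=
  balloonsLoop M (PySem.List.sorted A (fun x => -x) false) 0 0

-- ===== PORT B =====
-- prefix = [0]; for a in A: prefix.append(prefix[-1] + a)
def buildPrefix : List Int → List Int → List Int
  | [], p => p
  | a :: t, p => buildPrefix t (p ++ [PySem.List.pyGetD p (-1) 0 + a])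

-- for i, s in enumerate(prefix[1:], 1): if M <= s: return i  / fallthrough default
def searchIdx (M : Int) : List (Int × Int) → Int → Int
  | [], d => d
  | (i, s) :: t, d => if M ≤ s then i else searchIdx M t d

def balloons_alt (N : Int) (M : Int) (A : List Int) : Int :=
  let As := PySem.List.sorted A (fun x => x) true
  let pfx := buildPrefix As [0]
  searchIdx M (PySem.List.enumerate (PySem.List.slice pfx (some 1) none) 1) (As.length : Int)

-- ===== PRECONDITION & SPEC =====
def Spec_balloons (N : Int) (M : Int) (A : List Int) (out : Int) : Prop := out = balloons_alt N M A
instance (N : Int) (M : Int) (A : List Int) (out : Int) : Decidable (Spec_balloons N M A out) := by unfold Spec_balloons; infer_instance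

-- ===== CLAIM (what is proved, stated in full; the proofs are below) =====
def Claim_equal_balloons : Prop := ∀ (N : Int) (M : Int) (A : List Int), Dom_balloons N M A → Spec_balloons N M A (balloons N M A)

-- ===== LEMMAS AND PROOFS =====

-- partial sums of a list starting from accumulator s (what B's prefix list holds after the seed 0)
def pres : List Int → Int → List Int
  | [], _ => []
  | a :: t, s => (s + a) :: pres t (s + a)

-- sorting by the key  x ↦ -x  ascending is sorting by the identity key descending
theorem sorted_neg_eq_sorted_rev (A : List Int) :
    PySem.List.sorted A (fun x => -x) false = PySem.List.sorted A (fun x => x) true := by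
  rw [PySem.List.sorted_eq_foldl_insertBy, PySem.List.sorted_rev_eq_foldl_insertBy]
  have : (fun (a b : Int) => decide (-a < -b)) = (fun (a b : Int) => decide (b < a)) := by
    funext a b
    simp
  simp only [this]

theorem buildPrefix_eq (L : List Int) :
    ∀ (p : List Int) (h : p ≠ []), buildPrefix L p = p ++ pres L (p.getLast h) := by
  induction L with
  | nil => intro p h; simp [buildPrefix, pres]
  | cons a t ih =>
    intro p h
    have hne : p ++ [PySem.List.pyGetD p (-1) 0 + a] ≠ [] := by simp
    rw [buildPrefix, ih _ hne]
    simp [PySem.List.pyGetD_neg_one p 0 h, pres]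

theorem loop_eq_search (M : Int) (L : List Int) :
    ∀ (s c : Int),
      balloonsLoop M L s c
        = searchIdx M (PySem.List.enumerate (pres L s) (c + 1)) (c + (L.length : Int)) := by
  induction L with
  | nil => intro s c; simp [balloonsLoop, pres, PySem.List.enumerate_nil, searchIdx]
  | cons a t ih =>
    intro s c
    rw [balloonsLoop]
    simp only [pres, PySem.List.enumerate_cons, searchIdx]
    by_cases h : M ≤ s + a
    · simp [h]
    · simp only [h, if_false]
      rw [ih (s + a) (c + 1)]
      have hlen : c + 1 + (t.length : Int) = c + ((a :: t).length : Int) := by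
        push_cast [List.length_cons]; ring
      rw [hlen]

-- ===== VERDICT (by name: the statement is the Claim_ definition above) =====
theorem balloons_spec : Claim_equal_balloons := by
  intro N M A _
  show balloons N M A = balloons_alt N M A
  simp only [balloons, balloons_alt]
  rw [sorted_neg_eq_sorted_rev]
  have h0 : buildPrefix (PySem.List.sorted A (fun x => x) true) [0]
      = 0 :: pres (PySem.List.sorted A (fun x => x) true) 0 := by
    simpa using buildPrefix_eq (PySem.List.sorted A (fun x => x) true) [0] (by simp)
  rw [h0, PySem.List.slice_from_one]
  simpa using loop_eq_search M (PySem.List.sorted A (fun x => x) true) 0 0
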